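-- pv_equiv track=rewrite | github.com/kkomma/test-automation-basics | vacation_days.py | count_vacation_weeks
-- ===== SOURCE A (Python) =====
-- def count_vacation_weeks(year, A, B, W):
--     # Define the number of days in each month
--     days_in_month = {
--         'January': 31, 'February': 28, 'March': 31, 'April': 30,
--         'May': 31, 'June': 30, 'July': 31, 'August': 31,
--         'September': 30, 'October': 31, 'November': 30, 'December': 31
--     }
--     # Adjust for leap years
--     if (year % 4 == 0 and year % 100 != 0) or (year % 400 == 0):
--         days_in_month['February'] = 29
--
--     # Define the order of days in a week
--     days_in_week = ['Monday', 'Tuesday', 'Wednesday', 'Thursday', 'Friday', 'Saturday', 'Sunday']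
--
--     # Generate a list of all days in the year with their respective day names
--     all_days = []
--     idx = days_in_week.index(W)
--     for month in days_in_month:
--         for day in range(1, days_in_month[month] + 1):
--             all_days.append((month, day, days_in_week[idx]))
--             idx = (idx + 1) % 7
--
--     # Find the start and end indices
--     start_index = None
--     end_index = None
--
--     for i, (month, day, week_day) in enumerate(all_days):
--         if month == A and week_day == 'Monday' and start_index is None:
--             start_index = i
--         if month == B and week_day == 'Sunday':
--             end_index = i
--
--     if start_index is None or end_index is None:
--         return 0
--
--     # Count the number of full weeks between the start and end dates
--     total_days = end_index - start_index + 1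
--     total_weeks = total_days // 7
--
--     return total_weeks
-- ===== SOURCE B (Python) =====
-- def count_vacation_weeks(year, A, B, W):
--     # Arithmetic re-implementation: month start offsets + modular weekday
--     # formulas instead of materialising and scanning all 365/366 days.
--     leap = (year % 4 == 0 and year % 100 != 0) or (year % 400 == 0)
--     names = ['January', 'February', 'March', 'April', 'May', 'June', 'July',
--              'August', 'September', 'October', 'November', 'December']
--     lengths = [31, 29 if leap else 28, 31, 30, 31, 30, 31, 31, 30, 31, 30, 31]
--     weekdays = ['Monday', 'Tuesday', 'Wednesday', 'Thursday', 'Friday',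
--                 'Saturday', 'Sunday']
--     idx0 = weekdays.index(W)  # ValueError on an invalid weekday name, as in A
--     if A not in names or B not in names:
--         return 0
--     iA = names.index(A)
--     iB = names.index(B)
--     oA = sum(lengths[:iA])           # absolute 0-based position of A's first day
--     oB = sum(lengths[:iB])
--     lB = lengths[iB]
--     # day d (0-based, from Jan 1) has weekday index (idx0 + d) % 7; Monday = 0, Sunday = 6
--     start = oA + (-(idx0 + oA)) % 7              # first Monday of month A
--     end = oB + lB - 1 - ((idx0 + oB + lB - 1 - 6) % 7)   # last Sunday of month B
--     return (end - start + 1) // 7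
-- ===== Notes on version B (the rewrite author's own statement) =====
-- stated objective: faster
-- what changed: B replaces A's materialisation and linear scan of all 365/366 (month, day, weekday) tuples by direct arithmetic: month-offset prefix sums plus closed-form modular formulas for the first Monday of month A and the last Sunday of month B.
import Mathlib
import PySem

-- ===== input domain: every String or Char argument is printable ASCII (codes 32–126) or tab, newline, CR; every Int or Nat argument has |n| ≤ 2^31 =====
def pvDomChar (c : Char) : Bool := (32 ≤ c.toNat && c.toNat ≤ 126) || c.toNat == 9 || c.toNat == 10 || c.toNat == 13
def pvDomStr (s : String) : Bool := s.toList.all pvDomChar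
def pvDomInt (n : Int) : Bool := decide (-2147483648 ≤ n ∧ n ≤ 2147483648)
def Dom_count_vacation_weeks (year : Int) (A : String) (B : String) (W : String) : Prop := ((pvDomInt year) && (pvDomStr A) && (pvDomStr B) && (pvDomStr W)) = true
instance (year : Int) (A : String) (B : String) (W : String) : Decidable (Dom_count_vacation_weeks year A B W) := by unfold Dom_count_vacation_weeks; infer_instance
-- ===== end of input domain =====

-- B replaces A's build-and-scan over all 365/366 days by closed-form month-offset
-- arithmetic (first Monday / last Sunday via modular formulas); alternative algorithm.


-- ===== PORT A =====
-- the weekday list, shared literal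
def cvwWeek : List String := ["Monday", "Tuesday", "Wednesday", "Thursday", "Friday", "Saturday", "Sunday"]

-- leap-year test, Python `%` (both Pythons compute this same expression)
def cvwLeap (year : Int) : Bool :=
  (PySem.Int.mod year 4 == 0 && !(PySem.Int.mod year 100 == 0)) || PySem.Int.mod year 400 == 0

-- A's days_in_month dict, with the February overwrite (insertion order preserved)
def cvwDict (leap : Bool) : PySem.Dict String Int :=
  let d := PySem.Dict.ofList [("January", 31), ("February", 28), ("March", 31), ("April", 30),
    ("May", 31), ("June", 30), ("July", 31), ("August", 31),
    ("September", 30), ("October", 31), ("November", 30), ("December", 31)]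
  if leap then d.insert "February" 29 else d

-- inner loop body: append (month, day, days_in_week[idx]); idx = (idx + 1) % 7
-- (idx stays in 0..6, so days_in_week[idx] is pyGetD with an unreachable default)
def buildInner (month : String) (st : List (String × Int × String) × Int) (day : Int) :
    List (String × Int × String) × Int :=
  (st.1 ++ [(month, day, PySem.List.pyGetD cvwWeek st.2 "")], PySem.Int.mod (st.2 + 1) 7)

-- outer loop body: for day in range(1, days_in_month[month] + 1)
def buildOuter (d : PySem.Dict String Int) (st : List (String × Int × String) × Int)
    (month : String) : List (String × Int × String) × Int :=
  (PySem.List.pyRange 1 (d.getD month 0 + 1) 1).foldl (buildInner month) st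

-- scan loop body: the two ifs updating (start_index, end_index)
def scanStep (A B : String) (st : Option Int × Option Int) (p : Int × (String × Int × String)) :
    Option Int × Option Int :=
  let st1 := if p.2.1 == A && p.2.2.2 == "Monday" && st.1 == none then (some p.1, st.2) else st
  if p.2.1 == B && p.2.2.2 == "Sunday" then (st1.1, some p.1) else st1

-- body of A after the leap test; invalid W (ValueError) is excluded by Pre_, return 0 there
def cvwCore (leap : Bool) (A B W : String) : Int :=
  match PySem.List.index? cvwWeek W with
  | none => 0  -- days_in_week.index(W) raises ValueError; outside Pre_
  | some idx =>
    let d := cvwDict leap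
    let built := d.keys.foldl (buildOuter d) ([], (idx : Int))
    let scan := (PySem.List.enumerate built.1).foldl (scanStep A B) (none, none)
    match scan.1, scan.2 with
    | some s, some e => PySem.Int.floordiv (e - s + 1) 7
    | some _, none => 0
    | none, _ => 0

def count_vacation_weeks (year : Int) (A : String) (B : String) (W : String) : Int :=
  cvwCore (cvwLeap year) A B W

-- ===== PORT B =====
def cvwWeekdaysB : List String := ["Monday", "Tuesday", "Wednesday", "Thursday", "Friday",
  "Saturday", "Sunday"]

-- B's own leap-year test (same expression in Source B)
def cvwLeapB (year : Int) : Bool :=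
  (PySem.Int.mod year 4 == 0 && !(PySem.Int.mod year 100 == 0)) || PySem.Int.mod year 400 == 0

def cvwNames : List String := ["January", "February", "March", "April", "May", "June", "July",
  "August", "September", "October", "November", "December"]

def cvwLengths (leap : Bool) : List Int :=
  [31, if leap then 29 else 28, 31, 30, 31, 30, 31, 31, 30, 31, 30, 31]

-- body of B after the leap test
def cvwAltCore (leap : Bool) (A B W : String) : Int :=
  match PySem.List.index? cvwWeekdaysB W with
  | none => 0  -- weekdays.index(W) raises ValueError; outside Pre_
  | some idx0 =>
    let lengths := cvwLengths leap
    if !(cvwNames.contains A) || !(cvwNames.contains B) then 0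
    else
      let iA := ((PySem.List.index? cvwNames A).getD 0 : Nat)
      let iB := ((PySem.List.index? cvwNames B).getD 0 : Nat)
      let oA := (PySem.List.slice lengths none (some (iA : Int))).sum
      let oB := (PySem.List.slice lengths none (some (iB : Int))).sum
      let lB := lengths.getD iB 0
      let start := oA + PySem.Int.mod (-((idx0 : Int) + oA)) 7
      let stop := oB + lB - 1 - PySem.Int.mod ((idx0 : Int) + oB + lB - 1 - 6) 7
      PySem.Int.floordiv (stop - start + 1) 7

def count_vacation_weeks_alt (year : Int) (A : String) (B : String) (W : String) : Int :=
  cvwAltCore (cvwLeapB year) A B W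

-- ===== PRECONDITION & SPEC =====
-- Pre_ excludes exactly the invalid weekday names W, on which A raises ValueError
def Pre_count_vacation_weeks (year : Int) (A : String) (B : String) (W : String) : Prop :=
  W ∈ cvwWeek
instance (year : Int) (A : String) (B : String) (W : String) : Decidable (Pre_count_vacation_weeks year A B W) := by unfold Pre_count_vacation_weeks; infer_instance

def pvWitness_count_vacation_weeks : Int × String × String × String := (2024, "July", "August", "Monday")

def Spec_count_vacation_weeks (year : Int) (A : String) (B : String) (W : String) (out : Int) : Prop := out = count_vacation_weeks_alt year A B W
instance (year : Int) (A : String) (B : String) (W : String) (out : Int) : Decidable (Spec_count_vacation_weeks year A B W out) := by unfold Spec_count_vacation_weeks; infer_instance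

-- ===== CLAIM (what is proved, stated in full; the proofs are below) =====
def Claim_equal_count_vacation_weeks : Prop := ∀ (year : Int) (A : String) (B : String) (W : String), Dom_count_vacation_weeks year A B W → Pre_count_vacation_weeks year A B W → Spec_count_vacation_weeks year A B W (count_vacation_weeks year A B W)

-- ===== LEMMAS AND PROOFS =====

-- month table as (name, length) pairs, the shape both proofs are phrased over
def cvwPairs (l : Bool) : List (String × Nat) :=
  [("January", 31), ("February", if l then 29 else 28), ("March", 31), ("April", 30),
   ("May", 31), ("June", 30), ("July", 31), ("August", 31),
   ("September", 30), ("October", 31), ("November", 30), ("December", 31)]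

-- weekday name of absolute day offset k
def wd (k : Int) : String := PySem.List.pyGetD cvwWeek (PySem.Int.mod k 7) ""

-- the block of entries one month contributes; b = absolute offset of its day 1
def block (m : String) (n : Nat) (b : Int) : List (String × Int × String) :=
  (List.range n).map (fun d => (m, ((d : Int) + 1), wd (b + d)))

def blocks : List (String × Nat) → Int → List (String × Int × String)
  | [], _ => []
  | p :: t, b => block p.1 p.2 b ++ blocks t (b + p.2)

def pairOuter (st : List (String × Int × String) × Int) (p : String × Nat) :
    List (String × Int × String) × Int :=
  (PySem.List.pyRange 1 ((p.2 : Int) + 1) 1).foldl (buildInner p.1) st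

def stepS (A : String) (s : Option Int) (p : Int × (String × Int × String)) : Option Int :=
  if p.2.1 == A && p.2.2.2 == "Monday" && s == none then some p.1 else s

def stepE (B : String) (e : Option Int) (p : Int × (String × Int × String)) : Option Int :=
  if p.2.1 == B && p.2.2.2 == "Sunday" then some p.1 else e

def firstOff : List (String × Nat) → String → Option Int
  | [], _ => none
  | p :: t, A => if p.1 = A then some 0 else (firstOff t A).map ((p.2 : Int) + ·)

def lastOff : List (String × Nat) → String → Option (Int × Nat)
  | [], _ => none
  | p :: t, B =>
    match lastOff t B with
    | some (o, n) => some ((p.2 : Int) + o, n)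
    | none => if p.1 = B then some (0, p.2) else none

theorem length_block (m : String) (n : Nat) (b : Int) : (block m n b).length = n := by
  simp [block]

theorem month_of_mem_block {m : String} {n : Nat} {b : Int} {x : String × Int × String}
    (hx : x ∈ block m n b) : x.1 = m := by
  simp only [block, List.mem_map] at hx
  obtain ⟨d, _, rfl⟩ := hx
  rfl

theorem month_of_mem_enum_block {m : String} {n : Nat} {b s : Int}
    {q : Int × (String × Int × String)}
    (hq : q ∈ PySem.List.enumerate (block m n b) s) : q.2.1 = m := by
  rw [PySem.List.mem_enumerate_iff] at hq
  obtain ⟨k, hk, rfl⟩ := hq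
  exact month_of_mem_block (List.getElem_mem _)

-- the scan fold splits into two independent folds
theorem scan_decouple (A B : String) (L : List (Int × (String × Int × String)))
    (st : Option Int × Option Int) :
    L.foldl (scanStep A B) st = (L.foldl (stepS A) st.1, L.foldl (stepE B) st.2) := by
  induction L generalizing st with
  | nil => rfl
  | cons p t ih =>
    rw [List.foldl_cons, List.foldl_cons, List.foldl_cons, ih]
    have h1 : (scanStep A B st p).1 = stepS A st.1 p := by
      simp only [scanStep, stepS]
      split_ifs <;> rfl
    have h2 : (scanStep A B st p).2 = stepE B st.2 p := by
      simp only [scanStep, stepE]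
      split_ifs <;> rfl
    rw [h1, h2]

theorem stepS_some (A : String) (L : List (Int × (String × Int × String))) (x : Int) :
    L.foldl (stepS A) (some x) = some x := by
  induction L with
  | nil => rfl
  | cons p t ih => simpa [stepS] using ih

theorem S_skip (A : String) (L : List (Int × (String × Int × String))) (s : Option Int)
    (h : ∀ p ∈ L, p.2.1 ≠ A) : L.foldl (stepS A) s = s := by
  induction L generalizing s with
  | nil => rfl
  | cons p t ih =>
    have hp : p.2.1 ≠ A := h p (by simp)
    rw [List.foldl_cons, show stepS A s p = s by simp [stepS, hp]]
    exact ih s (fun q hq => h q (by simp [hq]))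

theorem E_skip (B : String) (L : List (Int × (String × Int × String))) (e : Option Int)
    (h : ∀ p ∈ L, p.2.1 ≠ B) : L.foldl (stepE B) e = e := by
  induction L generalizing e with
  | nil => rfl
  | cons p t ih =>
    have hp : p.2.1 ≠ B := h p (by simp)
    rw [List.foldl_cons, show stepE B e p = e by simp [stepE, hp]]
    exact ih e (fun q hq => h q (by simp [hq]))

theorem wd_monday (r : Int) (h0 : 0 ≤ r) (h7 : r < 7) :
    (PySem.List.pyGetD cvwWeek r "" == "Monday") = (r == 0) := by
  have : r = 0 ∨ r = 1 ∨ r = 2 ∨ r = 3 ∨ r = 4 ∨ r = 5 ∨ r = 6 := by omega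
  rcases this with rfl | rfl | rfl | rfl | rfl | rfl | rfl <;> decide

theorem wd_sunday (r : Int) (h0 : 0 ≤ r) (h7 : r < 7) :
    (PySem.List.pyGetD cvwWeek r "" == "Sunday") = (r == 6) := by
  have : r = 0 ∨ r = 1 ∨ r = 2 ∨ r = 3 ∨ r = 4 ∨ r = 5 ∨ r = 6 := by omega
  rcases this with rfl | rfl | rfl | rfl | rfl | rfl | rfl <;> decide

theorem block_succ (m : String) (n : Nat) (b : Int) :
    block m (n + 1) b = block m n b ++ [(m, (n : Int) + 1, wd (b + n))] := by
  simp [block, List.range_succ]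

theorem blockS_aux (m : String) (n : Nat) (b s₀ : Int) :
    (PySem.List.enumerate (block m n b) s₀).foldl (stepS m) none =
      if PySem.Int.mod (-b) 7 < (n : Int) then some (s₀ + PySem.Int.mod (-b) 7) else none := by
  have hm0 : 0 ≤ PySem.Int.mod (-b) 7 := PySem.Int.mod_nonneg _ (by norm_num)
  have hm7 : PySem.Int.mod (-b) 7 < 7 := PySem.Int.mod_lt _ (by norm_num)
  induction n with
  | zero =>
    rw [if_neg (by push_cast; omega)]
    rfl
  | succ n ih =>
    rw [block_succ, PySem.List.enumerate_append, List.foldl_append, ih, length_block]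
    have h1 : 0 ≤ PySem.Int.mod (b + n) 7 := PySem.Int.mod_nonneg _ (by norm_num)
    have h2 : PySem.Int.mod (b + n) 7 < 7 := PySem.Int.mod_lt _ (by norm_num)
    have e1 := PySem.Int.mod_eq_emod_of_pos (a := b + n) (b := 7) (by norm_num)
    have e2 := PySem.Int.mod_eq_emod_of_pos (a := -b) (b := 7) (by norm_num)
    by_cases hlt : PySem.Int.mod (-b) 7 < (n : Int)
    · rw [if_pos hlt, if_pos (by push_cast; omega)]
      simp [PySem.List.enumerate_cons, PySem.List.enumerate_nil, stepS]
    · rw [if_neg hlt]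
      simp only [PySem.List.enumerate_cons, PySem.List.enumerate_nil, List.foldl_cons,
        List.foldl_nil]
      by_cases heq : PySem.Int.mod (-b) 7 = (n : Int)
      · have hmon : (wd (b + n) == "Monday") = true := by
          rw [wd, wd_monday _ h1 h2]
          simp only [beq_iff_eq]
          omega
        rw [if_pos (by push_cast; omega)]
        simp only [stepS, hmon, heq]
        simp
      · have hmon : (wd (b + n) == "Monday") = false := by
          rw [wd, wd_monday _ h1 h2]
          simp only [beq_eq_false_iff_ne, ne_eq]
          push_cast at hlt heq ⊢
          omega
        rw [if_neg (by push_cast; omega)]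
        simp [stepS, hmon]

theorem blockS (m : String) (n : Nat) (hn : 7 ≤ n) (b s₀ : Int) :
    (PySem.List.enumerate (block m n b) s₀).foldl (stepS m) none =
      some (s₀ + PySem.Int.mod (-b) 7) := by
  rw [blockS_aux, if_pos]
  have := PySem.Int.mod_lt (-b) (b := 7) (by norm_num)
  omega

theorem blockE_aux (m : String) (n : Nat) (b s₀ : Int) (e₀ : Option Int) :
    (PySem.List.enumerate (block m n b) s₀).foldl (stepE m) e₀ =
      if PySem.Int.mod (6 - b) 7 < (n : Int) then
        some (s₀ + n - 1 - PySem.Int.mod (b + n - 1 - 6) 7) else e₀ := by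
  have hm0 : 0 ≤ PySem.Int.mod (6 - b) 7 := PySem.Int.mod_nonneg _ (by norm_num)
  have hm7 : PySem.Int.mod (6 - b) 7 < 7 := PySem.Int.mod_lt _ (by norm_num)
  induction n with
  | zero =>
    rw [if_neg (by push_cast; omega)]
    rfl
  | succ n ih =>
    rw [block_succ, PySem.List.enumerate_append, List.foldl_append, ih, length_block]
    simp only [PySem.List.enumerate_cons, PySem.List.enumerate_nil, List.foldl_cons,
      List.foldl_nil]
    have h1 : 0 ≤ PySem.Int.mod (b + n) 7 := PySem.Int.mod_nonneg _ (by norm_num)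
    have h2 : PySem.Int.mod (b + n) 7 < 7 := PySem.Int.mod_lt _ (by norm_num)
    have e1 := PySem.Int.mod_eq_emod_of_pos (a := b + n) (b := 7) (by norm_num)
    have e2 := PySem.Int.mod_eq_emod_of_pos (a := 6 - b) (b := 7) (by norm_num)
    have e3 := PySem.Int.mod_eq_emod_of_pos (a := b + n - 1 - 6) (b := 7) (by norm_num)
    have e4 := PySem.Int.mod_eq_emod_of_pos (a := b + (n + 1 : Nat) - 1 - 6) (b := 7) (by norm_num)
    by_cases hsun : PySem.Int.mod (b + n) 7 = 6
    · have hw : (wd (b + n) == "Sunday") = true := by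
        rw [wd, wd_sunday _ h1 h2]
        simp only [beq_iff_eq]
        omega
      have hstep : ∀ e, stepE m e (s₀ + (n : Int), m, (n : Int) + 1, wd (b + n)) =
          some (s₀ + (n : Int)) := by
        intro e
        simp [stepE, hw]
      rw [hstep, if_pos (by push_cast; omega)]
      congr 1
      push_cast at e4 ⊢
      omega
    · have hw : (wd (b + n) == "Sunday") = false := by
        rw [wd, wd_sunday _ h1 h2]
        simp only [beq_eq_false_iff_ne, ne_eq]
        omega
      have hstep : ∀ e, stepE m e (s₀ + (n : Int), m, (n : Int) + 1, wd (b + n)) = e := by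
        intro e
        simp [stepE, hw]
      rw [hstep]
      split_ifs with hc hc' hc'
      · congr 1
        push_cast at hc hc' e4 ⊢
        omega
      · exfalso
        push_cast at hc hc'
        omega
      · exfalso
        push_cast at hc hc' e4
        omega
      · rfl

theorem blockE (m : String) (n : Nat) (hn : 7 ≤ n) (b s₀ : Int) (e₀ : Option Int) :
    (PySem.List.enumerate (block m n b) s₀).foldl (stepE m) e₀ =
      some (s₀ + n - 1 - PySem.Int.mod (b + n - 1 - 6) 7) := by
  rw [blockE_aux, if_pos]
  have := PySem.Int.mod_lt (6 - b) (b := 7) (by norm_num)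
  omega

theorem startBlocks (A : String) (ps : List (String × Nat)) (b s₀ : Int)
    (hlen : ∀ p ∈ ps, 7 ≤ p.2) :
    (PySem.List.enumerate (blocks ps b) s₀).foldl (stepS A) none =
      (firstOff ps A).map (fun o => s₀ + o + PySem.Int.mod (-(b + o)) 7) := by
  induction ps generalizing b s₀ with
  | nil => rfl
  | cons p t ih =>
    rw [show blocks (p :: t) b = block p.1 p.2 b ++ blocks t (b + p.2) from rfl,
      PySem.List.enumerate_append, List.foldl_append, length_block]
    by_cases h : p.1 = A
    · subst h
      rw [blockS _ _ (hlen p (by simp)) _ _, stepS_some]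
      simp [firstOff]
    · rw [S_skip A _ _ (fun q hq => (month_of_mem_enum_block hq).symm ▸ h),
        ih _ _ (fun q hq => hlen q (by simp [hq]))]
      simp only [firstOff, if_neg h, Option.map_map]
      cases firstOff t A with
      | none => rfl
      | some o =>
        simp only [Option.map_some, Function.comp_apply]
        congr 2
        · ring
        · ring_nf

theorem endBlocks (B : String) (ps : List (String × Nat)) (b s₀ : Int) (e₀ : Option Int)
    (hlen : ∀ p ∈ ps, 7 ≤ p.2) :
    (PySem.List.enumerate (blocks ps b) s₀).foldl (stepE B) e₀ =
      match lastOff ps B with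
      | none => e₀
      | some (o, n) => some (s₀ + o + (n : Int) - 1 - PySem.Int.mod (b + o + n - 1 - 6) 7) := by
  induction ps generalizing b s₀ e₀ with
  | nil => rfl
  | cons p t ih =>
    rw [show blocks (p :: t) b = block p.1 p.2 b ++ blocks t (b + p.2) from rfl,
      PySem.List.enumerate_append, List.foldl_append, length_block,
      ih _ _ _ (fun q hq => hlen q (by simp [hq]))]
    cases hlo : lastOff t B with
    | some on =>
      obtain ⟨o, n⟩ := on
      simp only [lastOff, hlo]
      congr 2
      · ring
      · ring_nf
    | none =>
      simp only [lastOff, hlo]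
      by_cases h : p.1 = B
      · subst h
        rw [blockE _ _ (hlen p (by simp)) _ _ _, if_pos rfl]
        congr 2
        · ring
        · ring_nf
      · rw [if_neg h]
        exact E_skip B _ _ (fun q hq => (month_of_mem_enum_block hq).symm ▸ h)

theorem firstOff_none (A : String) (ps : List (String × Nat)) (h : A ∉ ps.map (·.1)) :
    firstOff ps A = none := by
  induction ps with
  | nil => rfl
  | cons p t ih =>
    simp only [List.map_cons, List.mem_cons] at h
    rw [not_or] at h
    rw [firstOff, if_neg (fun he => h.1 he.symm), ih h.2]
    rfl

theorem lastOff_none (B : String) (ps : List (String × Nat)) (h : B ∉ ps.map (·.1)) :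
    lastOff ps B = none := by
  induction ps with
  | nil => rfl
  | cons p t ih =>
    simp only [List.map_cons, List.mem_cons] at h
    rw [not_or] at h
    rw [lastOff, ih h.2]
    exact if_neg (fun he => h.1 he.symm)

theorem firstOff_split (A : String) (ps : List (String × Nat)) (pre suf : List String)
    (hsplit : ps.map (·.1) = pre ++ A :: suf) (hnot : A ∉ pre) :
    firstOff ps A = some ((((ps.map (·.2)).take pre.length).sum : Nat) : Int) := by
  induction ps generalizing pre with
  | nil => cases pre <;> simp at hsplit
  | cons p t ih =>
    cases pre with
    | nil =>
      simp only [List.map_cons, List.nil_append, List.cons.injEq] at hsplit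
      rw [firstOff, if_pos hsplit.1]
      simp
    | cons q pre' =>
      simp only [List.map_cons, List.cons_append, List.cons.injEq] at hsplit
      have hq : p.1 ≠ A := by
        intro he
        exact hnot (by rw [← hsplit.1, he]; exact List.mem_cons_self)
      rw [firstOff, if_neg hq, ih pre' hsplit.2 (fun hm => hnot (List.mem_cons_of_mem _ hm))]
      simp only [Option.map_some, List.map_cons, List.length_cons, List.take_succ_cons,
        List.sum_cons]
      push_cast
      ring_nf

theorem lastOff_split (B : String) (ps : List (String × Nat)) (pre suf : List String)
    (hsplit : ps.map (·.1) = pre ++ B :: suf) (hnd : (ps.map (·.1)).Nodup) :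
    lastOff ps B = some (((((ps.map (·.2)).take pre.length).sum : Nat) : Int),
      (ps.map (·.2)).getD pre.length 0) := by
  induction ps generalizing pre with
  | nil => cases pre <;> simp at hsplit
  | cons p t ih =>
    simp only [List.map_cons, List.nodup_cons] at hnd
    cases pre with
    | nil =>
      simp only [List.map_cons, List.nil_append, List.cons.injEq] at hsplit
      have hnotin : B ∉ t.map (·.1) := hsplit.1 ▸ hnd.1
      rw [lastOff, lastOff_none B t hnotin, if_pos hsplit.1]
      simp
    | cons q pre' =>
      simp only [List.map_cons, List.cons_append, List.cons.injEq] at hsplit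
      have hBt : B ∈ t.map (·.1) := by
        rw [hsplit.2]
        exact List.mem_append_right _ List.mem_cons_self
      have hq : p.1 ≠ B := fun he => hnd.1 (he ▸ hBt)
      rw [lastOff, ih pre' hsplit.2 hnd.2]
      simp only [List.map_cons, List.length_cons, List.take_succ_cons, List.sum_cons,
        List.getD_cons_succ]
      simp only [Option.some.injEq, Prod.mk.injEq, and_true]
      push_cast
      ring

-- the inner day loop builds one block
theorem innerFold (m : String) (n : Nat) (acc : List (String × Int × String)) (b : Int) :
    (PySem.List.pyRange 1 ((n : Int) + 1) 1).foldl (buildInner m) (acc, PySem.Int.mod b 7) =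
      (acc ++ block m n b, PySem.Int.mod (b + n) 7) := by
  induction n generalizing acc with
  | zero =>
    rw [show ((0 : Nat) : Int) + 1 = 1 by norm_num, PySem.List.pyRange_one_eq_nil (by norm_num)]
    simp [block]
  | succ n ih =>
    rw [show ((n + 1 : Nat) : Int) + 1 = ((n : Int) + 1) + 1 by push_cast; ring,
      PySem.List.pyRange_one_succ_right (by omega), List.foldl_append, ih]
    simp only [List.foldl_cons, List.foldl_nil, buildInner, block_succ]
    have e3 := PySem.Int.mod_eq_emod_of_pos (a := b + (n + 1 : Nat)) (b := 7) (by norm_num)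
    have e1 := PySem.Int.mod_eq_emod_of_pos (a := b + n) (b := 7) (by norm_num)
    have e2 := PySem.Int.mod_eq_emod_of_pos (a := PySem.Int.mod (b + n) 7 + 1) (b := 7)
      (by norm_num)
    rw [Prod.mk.injEq]
    constructor
    · rw [List.append_assoc]
      rfl
    · push_cast at e3 ⊢
      omega

-- the outer month loop builds the concatenated blocks
theorem outerFold (ps : List (String × Nat)) (acc : List (String × Int × String)) (b : Int) :
    ps.foldl pairOuter (acc, PySem.Int.mod b 7) =
      (acc ++ blocks ps b, PySem.Int.mod (b + ((ps.map (·.2)).sum : Nat)) 7) := by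
  induction ps generalizing acc b with
  | nil => simp [blocks]
  | cons p t ih =>
    rw [List.foldl_cons, show pairOuter (acc, PySem.Int.mod b 7) p =
        (acc ++ block p.1 p.2 b, PySem.Int.mod (b + p.2) 7) from innerFold p.1 p.2 acc b,
      ih (acc ++ block p.1 p.2 b) (b + p.2)]
    rw [Prod.mk.injEq]
    constructor
    · rw [show blocks (p :: t) b = block p.1 p.2 b ++ blocks t (b + p.2) from rfl,
        List.append_assoc]
    · congr 1
      push_cast [List.map_cons, List.sum_cons]
      ring

-- the port's fold over the dict's keys is the fold over the pair table
theorem bridge (ps : List (String × Nat)) (d : PySem.Dict String Int)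
    (hget : ∀ p ∈ ps, d.getD p.1 0 = ((p.2 : Nat) : Int))
    (st : List (String × Int × String) × Int) :
    (ps.map (·.1)).foldl (buildOuter d) st = ps.foldl pairOuter st := by
  induction ps generalizing st with
  | nil => rfl
  | cons p t ih =>
    rw [List.map_cons, List.foldl_cons, List.foldl_cons,
      show buildOuter d st p.1 = pairOuter st p by
        rw [buildOuter, pairOuter, hget p (by simp)]]
    exact ih (fun q hq => hget q (by simp [hq])) _

-- concrete facts about the tables, one per leap value
theorem keys_pairs (l : Bool) : (cvwDict l).keys = (cvwPairs l).map (·.1) := by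
  cases l <;> decide

theorem getD_pairs (l : Bool) : ∀ p ∈ cvwPairs l, (cvwDict l).getD p.1 0 = ((p.2 : Nat) : Int) := by
  cases l <;> decide

theorem names_pairs (l : Bool) : (cvwPairs l).map (·.1) = cvwNames := by
  cases l <;> decide

theorem lengths_pairs (l : Bool) :
    cvwLengths l = (cvwPairs l).map (fun p => ((p.2 : Nat) : Int)) := by
  cases l <;> decide

theorem hlen_pairs (l : Bool) : ∀ p ∈ cvwPairs l, 7 ≤ p.2 := by
  cases l <;> decide

theorem names_nodup : cvwNames.Nodup := by decide

-- take/sum of the Int length table is the cast of take/sum of the Nat one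
theorem sum_take_lengths (l : Bool) (k : Nat) :
    (PySem.List.slice (cvwLengths l) none (some (k : Int))).sum =
      (((((cvwPairs l).map (·.2)).take k).sum : Nat) : Int) := by
  rw [PySem.List.slice_to_natCast, lengths_pairs l,
    show (fun p : String × Nat => ((p.2 : Nat) : Int)) = (fun n : Nat => (n : Int)) ∘ (·.2)
      from rfl,
    ← List.map_map, ← List.map_take, ← Nat.cast_list_sum]

theorem getD_lengths (l : Bool) (k : Nat) :
    (cvwLengths l).getD k 0 = ((((cvwPairs l).map (·.2)).getD k 0 : Nat) : Int) := by
  rw [lengths_pairs l,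
    show (fun p : String × Nat => ((p.2 : Nat) : Int)) = (fun n : Nat => (n : Int)) ∘ (·.2)
      from rfl,
    ← List.map_map, show (0 : Int) = ((0 : Nat) : Int) from rfl, List.getD_map]

theorem core_eq (l : Bool) (A B W : String) (hW : W ∈ cvwWeek) :
    cvwCore l A B W = cvwAltCore l A B W := by
  have hsome : (PySem.List.index? cvwWeek W).isSome := (PySem.List.index?_isSome_iff _ _).mpr hW
  obtain ⟨i, hIdx⟩ := Option.isSome_iff_exists.mp hsome
  have hmodi : PySem.Int.mod (i : Int) 7 = (i : Int) := by
    have hi7 : i < 7 := by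
      obtain ⟨hk, -⟩ := PySem.List.getElem_of_index?_eq_some hIdx
      simpa [cvwWeek] using hk
    rw [PySem.Int.mod_eq_emod_of_pos (by norm_num)]
    omega
  have hbuilt : (cvwDict l).keys.foldl (buildOuter (cvwDict l)) ([], (i : Int)) =
      (blocks (cvwPairs l) (i : Int),
        PySem.Int.mod ((i : Int) + (((cvwPairs l).map (·.2)).sum : Nat)) 7) := by
    rw [keys_pairs l, bridge _ _ (getD_pairs l) _]
    conv_lhs => rw [← hmodi]
    rw [outerFold]
    simp
  have hscan : (PySem.List.enumerate (blocks (cvwPairs l) (i : Int))).foldl (scanStep A B)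
        (none, none) =
      ((PySem.List.enumerate (blocks (cvwPairs l) (i : Int)) 0).foldl (stepS A) none,
       (PySem.List.enumerate (blocks (cvwPairs l) (i : Int)) 0).foldl (stepE B) none) :=
    scan_decouple A B _ _
  rw [cvwCore, cvwAltCore, show cvwWeekdaysB = cvwWeek from rfl, hIdx]
  simp only [hbuilt, hscan,
    startBlocks A (cvwPairs l) (i : Int) 0 (hlen_pairs l),
    endBlocks B (cvwPairs l) (i : Int) 0 none (hlen_pairs l)]
  by_cases hA : A ∈ cvwNames
  · by_cases hB : B ∈ cvwNames
    · -- both months valid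
      have hAs : (PySem.List.index? cvwNames A).isSome :=
        (PySem.List.index?_isSome_iff _ _).mpr hA
      obtain ⟨kA, hKA⟩ := Option.isSome_iff_exists.mp hAs
      have hBs : (PySem.List.index? cvwNames B).isSome :=
        (PySem.List.index?_isSome_iff _ _).mpr hB
      obtain ⟨kB, hKB⟩ := Option.isSome_iff_exists.mp hBs
      obtain ⟨preA, sufA, hsplA, hlenA, hnotA⟩ := (PySem.List.index?_eq_some_iff _ _ _).mp hKA
      obtain ⟨preB, sufB, hsplB, hlenB, hnotB⟩ := (PySem.List.index?_eq_some_iff _ _ _).mp hKB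
      rw [firstOff_split A (cvwPairs l) preA sufA (by rw [names_pairs l, hsplA]) hnotA,
        lastOff_split B (cvwPairs l) preB sufB (by rw [names_pairs l, hsplB])
          (by rw [names_pairs l]; exact names_nodup)]
      have hcA : cvwNames.contains A = true := by simpa using hA
      have hcB : cvwNames.contains B = true := by simpa using hB
      simp only [hcA, hcB, Bool.not_true, Bool.or_self, Bool.false_eq_true, if_false,
        Option.map_some, hKA, hKB, Option.getD_some, hlenA, hlenB,
        sum_take_lengths, getD_lengths]
      congr 1
      have em1 := PySem.Int.mod_eq_emod_of_pos
        (a := -((i : Int) + ((((cvwPairs l).map (·.2)).take kA).sum : Nat))) (b := 7)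
        (by norm_num)
      omega
    · -- B is not a month name: end_index stays None, both return 0
      have hoffB : lastOff (cvwPairs l) B = none :=
        lastOff_none B _ (by rw [names_pairs l]; exact hB)
      have hcB : cvwNames.contains B = false := by simpa using hB
      rw [hoffB]
      simp only [hcB, Bool.not_false, Bool.or_true, if_true]
      cases (firstOff (cvwPairs l) A).map
          (fun o => 0 + o + PySem.Int.mod (-((i : Int) + o)) 7) <;> rfl
  · -- A is not a month name: start_index stays None, both return 0
    have hoffA : firstOff (cvwPairs l) A = none :=
      firstOff_none A _ (by rw [names_pairs l]; exact hA)
    have hcA : cvwNames.contains A = false := by simpa using hA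
    rw [hoffA]
    simp only [hcA, Bool.not_false, Bool.true_or, if_true, Option.map_none]

-- ===== VERDICT (by name: the statement is the Claim_ definition above) =====
theorem count_vacation_weeks_spec : Claim_equal_count_vacation_weeks := by
  intro year A B W _ hpre
  unfold Spec_count_vacation_weeks count_vacation_weeks count_vacation_weeks_alt
  exact core_eq (cvwLeap year) A B W hpre
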